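-- pv_equiv track=rewrite | github.com/PowerCleanX/ChroniconSaveEditor | src/chronicon_save_editor/parser/json_container.py | _parse_json_string
-- ===== SOURCE A (Python) =====
-- class SaveFormatError(ValueError):
--     """Raised when a save file does not match the expected JSON container shape."""
--
-- def _parse_json_string(raw_text: str, start: int) -> tuple[int, int, int, int]:
--     if raw_text[start] != '"':
--         raise SaveFormatError("Expected JSON string.")
--
--     index = start + 1
--     while index < len(raw_text):
--         character = raw_text[index]
--         if character == "\\":
--             index += 2
--             continue
--         if character == '"':
--             return start, index + 1, start + 1, index
--         index += 1
--
--     raise SaveFormatError("Unterminated JSON string.")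
-- ===== SOURCE B (Python) =====
-- class SaveFormatError(ValueError):
--     """Raised when a save file does not match the expected JSON container shape."""
--
-- def _parse_json_string(raw_text: str, start: int) -> tuple[int, int, int, int]:
--     if raw_text[start] != '"':
--         raise SaveFormatError("Expected JSON string.")
--
--     search_from = start + 1
--     while True:
--         quote = raw_text.find('"', search_from)
--         if quote == -1:
--             raise SaveFormatError("Unterminated JSON string.")
--         run = quote
--         while run > start + 1 and raw_text[run - 1] == "\\":
--             run -= 1
--         if (quote - run) % 2 == 0:
--             return start, quote + 1, start + 1, quote
--         search_from = quote + 1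
-- ===== Notes on version B (the rewrite author's own statement) =====
-- stated objective: alternative
-- what changed: A's per-character while-loop (skipping escapes with index += 2) is replaced by repeatedly jumping to the next '"' with str.find and accepting it iff the run of consecutive backslashes immediately before it has even length.
-- outside the precondition, e.g. on _parse_json_string('x"a"', -3): A returns (-3, 0, -2, -1), B returns (-3, 4, -2, 3)
import Mathlib
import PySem

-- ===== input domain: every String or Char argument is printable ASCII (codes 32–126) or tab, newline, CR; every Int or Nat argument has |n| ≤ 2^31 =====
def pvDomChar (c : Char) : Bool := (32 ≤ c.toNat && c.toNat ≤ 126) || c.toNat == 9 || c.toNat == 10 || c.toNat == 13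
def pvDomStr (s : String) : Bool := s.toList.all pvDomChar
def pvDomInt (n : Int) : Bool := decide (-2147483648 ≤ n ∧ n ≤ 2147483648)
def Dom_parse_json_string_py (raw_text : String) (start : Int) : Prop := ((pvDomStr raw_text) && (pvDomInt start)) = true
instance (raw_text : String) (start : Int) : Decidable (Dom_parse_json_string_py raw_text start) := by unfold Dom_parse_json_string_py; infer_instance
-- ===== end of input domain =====

-- B replaces A's char-by-char escape-skipping scan by jumping between quote positions with
-- str.find and checking the parity of the backslash run before each quote (objective:
-- alternative algorithm, same O(n) cost).
-- Both programs raise (return no value) on a non-'"' start, out-of-range start and unterminated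
-- strings; those inputs are outside Pre_ below.  The fuel arguments of the loop helpers are pure
-- totality guards (each loop advances by at least one position per step, so the given fuel is
-- never exhausted on the inputs Pre_ admits).

-- ===== PORT A =====
-- the 'while index < len(raw_text)' loop of A; (0,0,0,0) stands for the raised exceptions
-- (IndexError / SaveFormatError), which Pre_ excludes
def pvLoopA (s : List Char) (start : Int) : Nat → Int → Int × Int × Int × Int
  | 0, _ => (0, 0, 0, 0)                  -- fuel guard (never reached from the entry point on Pre_)
  | fuel + 1, index =>
    if index < (s.length : Int) then
      match PySem.List.pyGet? s index with
      | none => (0, 0, 0, 0)              -- IndexError (negative index below -len)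
      | some character =>
        if character = '\\' then pvLoopA s start fuel (index + 2)
        else if character = '"' then (start, index + 1, start + 1, index)
        else pvLoopA s start fuel (index + 1)
    else (0, 0, 0, 0)                     -- raise SaveFormatError "Unterminated JSON string."

def parse_json_string_py (raw_text : String) (start : Int) : Int × Int × Int × Int :=
  match PySem.Str.pyGet? raw_text start with
  | none => (0, 0, 0, 0)                  -- IndexError on raw_text[start]
  | some c =>
    if c ≠ '"' then (0, 0, 0, 0)          -- raise SaveFormatError "Expected JSON string."
    else pvLoopA raw_text.toList start (raw_text.toList.length + 2) (start + 1)

-- ===== PORT B =====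
-- the inner 'while run > start + 1 and raw_text[run-1] == "\\"' loop of B
def pvRunB (s : List Char) (start : Int) : Nat → Int → Int
  | 0, run => run                         -- fuel guard (never reached: run decreases towards start+1)
  | fuel + 1, run =>
    if start + 1 < run ∧ PySem.List.pyGet? s (run - 1) = some '\\' then
      pvRunB s start fuel (run - 1)
    else run

-- the outer 'while True' loop of B: jump to the next '"' with find, test the backslash-run parity
def pvLoopB (s : List Char) (start : Int) : Nat → Int → Int × Int × Int × Int
  | 0, _ => (0, 0, 0, 0)                  -- fuel guard (never reached: find moves strictly forward)
  | fuel + 1, search_from =>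
    let quote := PySem.Chars.findFrom s ['"'] search_from
    if quote = -1 then (0, 0, 0, 0)       -- raise SaveFormatError "Unterminated JSON string."
    else
      let run := pvRunB s start s.length quote
      if (quote - run) % 2 = 0 then (start, quote + 1, start + 1, quote)
      else pvLoopB s start fuel (quote + 1)

def parse_json_string_py_alt (raw_text : String) (start : Int) : Int × Int × Int × Int :=
  match PySem.Str.pyGet? raw_text start with
  | none => (0, 0, 0, 0)                  -- IndexError on raw_text[start]
  | some c =>
    if c ≠ '"' then (0, 0, 0, 0)          -- raise SaveFormatError "Expected JSON string."
    else pvLoopB raw_text.toList start (raw_text.toList.length + 2) (start + 1)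

-- ===== PRECONDITION & SPEC =====
-- number of consecutive '\' immediately before position q (not reaching below position lo)
def pvBsRun (s : List Char) (lo : Nat) : Nat → Nat
  | 0 => 0
  | q + 1 => if lo ≤ q ∧ s[q]? = some '\\' then pvBsRun s lo q + 1 else 0

-- Pre_ excludes (a) inputs where A raises: start out of range, raw_text[start] ≠ '"', and
-- unterminated strings (no closing quote after an even backslash run); and (b) in-range start
-- ≤ -2, where Python's negative-index wraparound makes A scan with wrapped indices and A's and
-- B's values are both accidental (start = -1, whose scan runs from index 0, stays inside Pre_).
def Pre_parse_json_string_py (raw_text : String) (start : Int) : Prop :=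
  -1 ≤ start ∧ start < (raw_text.toList.length : Int) ∧
    PySem.List.pyGet? raw_text.toList start = some '"' ∧
    ∃ q < raw_text.toList.length, start < (q : Int) ∧ raw_text.toList[q]? = some '"' ∧
      pvBsRun raw_text.toList ((start + 1).toNat) q % 2 = 0
instance (raw_text : String) (start : Int) : Decidable (Pre_parse_json_string_py raw_text start) := by
  unfold Pre_parse_json_string_py; infer_instance

def pvWitness_parse_json_string_py : String × Int := ("\"ab\\\"c\"", 0)

def Spec_parse_json_string_py (raw_text : String) (start : Int) (out : Int × Int × Int × Int) : Prop :=
  out = parse_json_string_py_alt raw_text start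
instance (raw_text : String) (start : Int) (out : Int × Int × Int × Int) :
    Decidable (Spec_parse_json_string_py raw_text start out) := by
  unfold Spec_parse_json_string_py; infer_instance

-- ===== CLAIM (what is proved, stated in full; the proofs are below) =====
def Claim_equal_parse_json_string_py : Prop := ∀ (raw_text : String) (start : Int), Dom_parse_json_string_py raw_text start → Pre_parse_json_string_py raw_text start → Spec_parse_json_string_py raw_text start (parse_json_string_py raw_text start)

-- ===== LEMMAS AND PROOFS =====
-- Both loops are proved equal to 'pvRender start (pvFindGood s ((start+1).toNat) ((start+1).toNat))':
-- pvFindGood finds the first position ≥ i holding '"' preceded by an even backslash run.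

def pvRender (start : Int) : Option Nat → Int × Int × Int × Int
  | some q => (start, (q : Int) + 1, start + 1, (q : Int))
  | none => (0, 0, 0, 0)

def pvFindGood (s : List Char) (lo : Nat) (i : Nat) : Option Nat :=
  if i < s.length then
    if s[i]? = some '"' ∧ pvBsRun s lo i % 2 = 0 then some i
    else pvFindGood s lo (i + 1)
  else none
termination_by s.length - i

theorem pvFindGood_stop (s : List Char) (lo i : Nat) (h : ¬ i < s.length) :
    pvFindGood s lo i = none := by
  rw [pvFindGood]; simp [h]

theorem pvFindGood_congr (s : List Char) (lo : Nat) (i k : Nat) (hik : i ≤ k)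
    (h : ∀ j, i ≤ j → j < k → ¬ (s[j]? = some '"' ∧ pvBsRun s lo j % 2 = 0)) :
    pvFindGood s lo i = pvFindGood s lo k := by
  rcases Nat.le.dest hik with ⟨d, rfl⟩
  clear hik
  induction d generalizing i with
  | zero => rfl
  | succ d ih =>
      have hstep : pvFindGood s lo i = pvFindGood s lo (i + 1) := by
        by_cases hi : i < s.length
        · rw [pvFindGood]
          simp only [hi, if_true]
          rw [if_neg (h i le_rfl (by omega))]
        · rw [pvFindGood_stop s lo i hi, pvFindGood_stop s lo (i + 1) (by omega)]
      rw [hstep, show i + (d + 1) = (i + 1) + d from by omega]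
      exact ih (i + 1) (fun j hj1 hj2 => h j (by omega) (by omega))

theorem pvBsRun_lo (s : List Char) (lo : Nat) : pvBsRun s lo lo = 0 := by
  cases lo with
  | zero => rfl
  | succ q => simp [pvBsRun]

-- bounds of PySem.Chars.find / findFrom, read off their definitions
theorem pvFind_lt_length (l sub : List Char) (hsub : sub ≠ [])
    (h : PySem.Chars.find l sub ≠ -1) :
    0 ≤ PySem.Chars.find l sub ∧ PySem.Chars.find l sub < (l.length : Int) := by
  have h0 : -1 ≤ PySem.Chars.find l sub := PySem.Chars.neg_one_le_find l sub
  have h1 : 0 ≤ PySem.Chars.find l sub := by omega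
  obtain ⟨hp, -⟩ := PySem.Chars.find_spec (s := l) (sub := sub) h1
  have hne : l.drop (PySem.Chars.find l sub).toNat ≠ [] := by
    intro hnil
    rw [hnil] at hp
    exact hsub (List.prefix_nil.mp hp)
  have hlt : (PySem.Chars.find l sub).toNat < l.length := by
    by_contra hge
    exact hne (List.drop_eq_nil_of_le (by omega))
  omega

theorem pvFindFrom_bounds (s sub : List Char) (hsub : sub ≠ []) (k : Int)
    (h : PySem.Chars.findFrom s sub k none ≠ -1) :
    k ≤ PySem.Chars.findFrom s sub k none ∧ 0 ≤ PySem.Chars.findFrom s sub k none ∧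
      PySem.Chars.findFrom s sub k none < (s.length : Int) := by
  simp only [PySem.Chars.findFrom] at h ⊢
  split_ifs at h ⊢ with h1 h2 h3 h4 h5 h6
  all_goals try exact absurd rfl h
  all_goals
    obtain ⟨ha, hb⟩ := pvFind_lt_length _ sub hsub (by assumption)
    simp only [List.length_drop, Int.toNat_natCast, List.take_length] at *
    omega

-- s[j] = '"' makes ['"'] a prefix of s.drop j, hence an infix of s.drop i for i ≤ j
theorem pvQuote_infix (s : List Char) (i j : Nat) (hij : i ≤ j)
    (hj : s[j]? = some '"') : ['"'] <:+: s.drop i := by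
  have hjl : j < s.length := by
    by_contra hge
    rw [List.getElem?_eq_none (show s.length ≤ j by omega)] at hj
    cases hj
  have hpre : ['"'] <+: s.drop j := by
    rw [List.drop_eq_getElem_cons hjl]
    have : s[j] = '"' := by
      have := List.getElem?_eq_getElem hjl
      rw [this] at hj; exact Option.some.inj hj
    rw [this]
    exact ⟨s.drop (j + 1), rfl⟩
  have hdd : s.drop j = (s.drop i).drop (j - i) := by
    rw [List.drop_drop]
    congr 1
    omega
  rw [hdd] at hpre
  exact hpre.isInfix.trans (List.drop_suffix _ _).isInfix

-- ===== the A-side characterisation =====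
theorem pvLoopA_eq (s : List Char) (start : Int) (_hs : -1 ≤ start) :
    ∀ m i, s.length + 1 - i ≤ m → start + 1 ≤ (i : Int) →
      pvBsRun s ((start + 1).toNat) i % 2 = 0 →
      pvLoopA s start m (i : Int) = pvRender start (pvFindGood s ((start + 1).toNat) i) := by
  intro m
  induction m with
  | zero =>
      intro i hm _ _
      rw [pvLoopA, pvFindGood_stop s _ i (by omega)]
      rfl
  | succ m ih =>
      intro i hm hi hrun
      by_cases hilen : i < s.length
      · have hlo : (start + 1).toNat ≤ i := by omega
        have hget : PySem.List.pyGet? s (i : Int) = some s[i] := by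
          simp [List.getElem?_eq_getElem hilen]
        rw [pvLoopA, if_pos (by exact_mod_cast hilen), hget]
        simp only []
        by_cases hbs : s[i] = '\\'
        · rw [if_pos hbs]
          have hqi : ¬ (s[i]? = some '"') := by
            simp [List.getElem?_eq_getElem hilen, hbs]
          have e1 : pvFindGood s ((start + 1).toNat) i = pvFindGood s ((start + 1).toNat) (i + 1) := by
            rw [pvFindGood]
            simp only [hilen, if_true]
            rw [if_neg (by intro hc; exact hqi hc.1)]
          have bsi1 : pvBsRun s ((start + 1).toNat) (i + 1) = pvBsRun s ((start + 1).toNat) i + 1 := by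
            simp only [pvBsRun]
            rw [if_pos ⟨hlo, by simp [List.getElem?_eq_getElem hilen, hbs]⟩]
          have e2 : pvFindGood s ((start + 1).toNat) (i + 1) = pvFindGood s ((start + 1).toNat) (i + 2) := by
            by_cases h2 : i + 1 < s.length
            · rw [pvFindGood]
              simp only [h2, if_true]
              rw [if_neg (by rintro ⟨-, hpar⟩; omega)]
            · rw [pvFindGood_stop s _ (i + 1) h2, pvFindGood_stop s _ (i + 2) (by omega)]
          have inv2 : pvBsRun s ((start + 1).toNat) (i + 2) % 2 = 0 := by
            have : pvBsRun s ((start + 1).toNat) (i + 1 + 1) =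
                if (start + 1).toNat ≤ i + 1 ∧ s[i + 1]? = some '\\'
                then pvBsRun s ((start + 1).toNat) (i + 1) + 1 else 0 := by
              simp only [pvBsRun]
            rw [show i + 2 = i + 1 + 1 from rfl, this]
            split_ifs with hc
            · omega
            · rfl
          have hcast : (i : Int) + 2 = ((i + 2 : Nat) : Int) := by push_cast; ring
          rw [hcast, ih (i + 2) (by omega) (by push_cast; omega) inv2, e1, e2]
        · rw [if_neg hbs]
          by_cases hq : s[i] = '"'
          · rw [if_pos hq]
            have : pvFindGood s ((start + 1).toNat) i = some i := by
              rw [pvFindGood]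
              simp only [hilen, if_true]
              rw [if_pos ⟨by simp [List.getElem?_eq_getElem hilen, hq], hrun⟩]
            rw [this]
            rfl
          · rw [if_neg hq]
            have e1 : pvFindGood s ((start + 1).toNat) i = pvFindGood s ((start + 1).toNat) (i + 1) := by
              rw [pvFindGood]
              simp only [hilen, if_true]
              rw [if_neg (by rintro ⟨hc, -⟩; rw [List.getElem?_eq_getElem hilen] at hc; exact hq (Option.some.inj hc))]
            have inv1 : pvBsRun s ((start + 1).toNat) (i + 1) % 2 = 0 := by
              simp only [pvBsRun]
              rw [if_neg (by rintro ⟨-, hc⟩; rw [List.getElem?_eq_getElem hilen] at hc; exact hbs (Option.some.inj hc))]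
            have hcast : (i : Int) + 1 = ((i + 1 : Nat) : Int) := by push_cast; ring
            rw [hcast, ih (i + 1) (by omega) (by push_cast; omega) inv1, e1]
      · have hni : ¬ ((i : Int) < (s.length : Int)) := by omega
        rw [pvLoopA, if_neg hni, pvFindGood_stop s _ i hilen]
        rfl

-- ===== the B-side characterisation =====
theorem pvRunB_eq (s : List Char) (start : Int) (hs : -1 ≤ start) :
    ∀ fuel (q : Nat), (start + 1).toNat ≤ q → q - ((start + 1).toNat) ≤ fuel →
      pvRunB s start fuel (q : Int) = (q : Int) - (pvBsRun s ((start + 1).toNat) q : Int) := by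
  intro fuel
  induction fuel with
  | zero =>
      intro q hq hf
      have : q = (start + 1).toNat := by omega
      rw [this, pvRunB, pvBsRun_lo]
      simp
  | succ fuel ih =>
      intro q hq hf
      cases q with
      | zero =>
          rw [pvRunB, if_neg (by rintro ⟨h1, -⟩; omega)]
          simp [pvBsRun]
      | succ q =>
          rw [pvRunB]
          have hshift : ((q + 1 : Nat) : Int) - 1 = (q : Int) := by push_cast; ring
          by_cases hc : (start + 1).toNat ≤ q ∧ s[q]? = some '\\'
          · rw [if_pos ⟨by omega, by rw [hshift]; simp [hc.2]⟩]
            rw [hshift, ih q hc.1 (by omega)]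
            have : pvBsRun s ((start + 1).toNat) (q + 1) = pvBsRun s ((start + 1).toNat) q + 1 := by
              simp only [pvBsRun]
              rw [if_pos hc]
            rw [this]
            push_cast; ring
          · have hbs0 : pvBsRun s ((start + 1).toNat) (q + 1) = 0 := by
              simp only [pvBsRun]
              rw [if_neg hc]
            rw [hbs0]
            rw [if_neg]
            · simp
            · rintro ⟨h1, h2⟩
              rw [hshift] at h2
              have hq' : s[q]? = some '\\' := by
                rw [PySem.List.pyGet?_natCast] at h2
                exact h2
              exact hc ⟨by omega, hq'⟩

theorem pvLoopB_eq (s : List Char) (start : Int) (hs : -1 ≤ start) :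
    ∀ m (i : Nat), s.length + 1 - i ≤ m → start + 1 ≤ (i : Int) →
      pvLoopB s start m (i : Int) = pvRender start (pvFindGood s ((start + 1).toNat) i) := by
  intro m
  induction m with
  | zero =>
      intro i hm _
      rw [pvLoopB, pvFindGood_stop s _ i (by omega)]
      rfl
  | succ m ih =>
      intro i hm hi
      by_cases hq : PySem.Chars.findFrom s ['"'] (i : Int) none = -1
      · rw [pvLoopB]
        simp only [hq, if_pos]
        -- no quote at any j ≥ i: pvFindGood is none
        have hnoq : ∀ j, i ≤ j → ¬ (s[j]? = some '"') := by
          intro j hij hj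
          by_cases hil : i ≤ s.length
          · rw [PySem.Chars.findFrom_natCast_eq_neg_one_iff s ['"'] i hil] at hq
            exact hq (pvQuote_infix s i j hij hj)
          · have : j < s.length := by
              by_contra hge
              rw [List.getElem?_eq_none (show s.length ≤ j by omega)] at hj
              cases hj
            omega
        have : pvFindGood s ((start + 1).toNat) i = pvFindGood s ((start + 1).toNat) s.length := by
          by_cases hil : i ≤ s.length
          · exact pvFindGood_congr s _ i s.length hil
              (fun j hj1 _ => by rintro ⟨hc, -⟩; exact hnoq j hj1 hc)
          · rw [pvFindGood_stop s _ i (by omega), pvFindGood_stop s _ s.length (by omega)]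
        rw [this, pvFindGood_stop s _ s.length (by omega)]
        rfl
      · rw [pvLoopB]
        simp only []
        rw [if_neg hq]
        obtain ⟨hki, hk0, hklen⟩ := pvFindFrom_bounds s ['"'] (by simp) (i : Int) hq
        set qI : Int := PySem.Chars.findFrom s ['"'] (i : Int) none with hqI
        have hil : i ≤ s.length := by omega
        obtain ⟨-, hpref, hmin⟩ := PySem.Chars.findFrom_natCast_spec s ['"'] i hil hq
        rw [← hqI] at hpref hmin
        have hqn : qI = ((qI.toNat : Nat) : Int) := by omega
        have hqlen : qI.toNat < s.length := by omega
        have hqi : i ≤ qI.toNat := by omega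
        -- the found position holds a quote
        have hquote : s[qI.toNat]? = some '"' := by
          rw [List.drop_eq_getElem_cons hqlen] at hpref
          obtain ⟨t, ht⟩ := hpref
          rw [List.getElem?_eq_getElem hqlen]
          simp only [List.singleton_append] at ht
          rw [← List.cons.injEq ('"') t (s[qI.toNat]) (s.drop (qI.toNat + 1)) |>.mp ht |>.1]
        -- no quote strictly before it (at ≥ i)
        have hnoq : ∀ j, i ≤ j → j < qI.toNat → ¬ (s[j]? = some '"') := by
          intro j hj1 hj2 hj
          exact hmin j hj1 hj2 (by
            rw [List.drop_eq_getElem_cons (by omega)]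
            have : s[j] = '"' := by
              have := List.getElem?_eq_getElem (l := s) (i := j) (by omega)
              rw [this] at hj; exact Option.some.inj hj
            rw [this]
            exact ⟨s.drop (j + 1), rfl⟩)
        have hrun : pvRunB s start s.length qI = qI - (pvBsRun s ((start + 1).toNat) qI.toNat : Int) := by
          rw [hqn]
          exact pvRunB_eq s start hs s.length qI.toNat (by omega) (by omega)
        rw [hrun]
        have hdiff : qI - (qI - (pvBsRun s ((start + 1).toNat) qI.toNat : Int)) =
            (pvBsRun s ((start + 1).toNat) qI.toNat : Int) := by ring
        rw [hdiff]
        by_cases hpar : pvBsRun s ((start + 1).toNat) qI.toNat % 2 = 0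
        · rw [if_pos (by omega)]
          have : pvFindGood s ((start + 1).toNat) i = some qI.toNat := by
            rw [pvFindGood_congr s _ i qI.toNat hqi
              (fun j hj1 hj2 => by rintro ⟨hc, -⟩; exact hnoq j hj1 hj2 hc)]
            rw [pvFindGood]
            simp only [hqlen, if_true]
            rw [if_pos ⟨hquote, hpar⟩]
          rw [this]
          simp only [pvRender]
          rw [show ((qI.toNat : Int)) = qI from by omega]
        · rw [if_neg (by omega)]
          have hcast : qI + 1 = ((qI.toNat + 1 : Nat) : Int) := by omega
          rw [hcast, ih (qI.toNat + 1) (by omega) (by push_cast; omega),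
            pvFindGood_congr s ((start + 1).toNat) i (qI.toNat + 1) (by omega) (by
              intro j hj1 hj2
              rintro ⟨hc, hpar'⟩
              by_cases hje : j = qI.toNat
              · subst hje; exact hpar hpar'
              · exact hnoq j hj1 (by omega) hc)]

-- ===== VERDICT (by name: the statement is the Claim_ definition above) =====
theorem parse_json_string_py_spec : Claim_equal_parse_json_string_py := by
  unfold Claim_equal_parse_json_string_py
  intro raw_text start _hdom hpre
  unfold Spec_parse_json_string_py
  obtain ⟨hs0, hslen, hquote, -⟩ := hpre
  have hget : PySem.Str.pyGet? raw_text start = some '"' := by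
    simp [hquote]
  unfold parse_json_string_py parse_json_string_py_alt
  simp only [hget]
  simp only [ne_eq, not_true_eq_false, not_false_eq_true, if_neg]
  have hcast : start + 1 = (((start + 1).toNat : Nat) : Int) := by omega
  rw [hcast,
    pvLoopA_eq raw_text.toList start hs0 (raw_text.toList.length + 2) ((start + 1).toNat)
      (by omega) (by omega) (by rw [pvBsRun_lo]),
    pvLoopB_eq raw_text.toList start hs0 (raw_text.toList.length + 2) ((start + 1).toNat)
      (by omega) (by omega)]
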